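-- pv_equiv track=rewrite | github.com/elifesciences/sciencebeam-parser | sciencebeam_parser/models/model.py | iter_entities_including_other
-- ===== SOURCE A (Python) =====
-- from typing import Dict, Iterable, List, NamedTuple, Optional, Set, Tuple, Union
--
-- def iter_entities_including_other(seq: List[str]) -> Iterable[Tuple[str, int, int]]:
--     """
--     Similar to get_entities, but also other (`O`) tag
--     """
--     prev_tag = 'O'
--     prev_start = 0
--     for index, prefixed_tag in enumerate(seq):
--         if '-' in prefixed_tag:
--             prefix, tag = prefixed_tag.split('-', maxsplit=1)
--         else:
--             prefix = ''
--             tag = prefixed_tag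
--         if prefix == 'B' or tag != prev_tag:
--             if prev_start < index:
--                 yield prev_tag, prev_start, index - 1
--             prev_tag = tag
--             prev_start = index
--     if prev_start < len(seq):
--         yield prev_tag, prev_start, len(seq) - 1
-- ===== SOURCE B (Python) =====
-- from typing import Iterable, List, Tuple
--
-- def iter_entities_including_other(seq: List[str]) -> Iterable[Tuple[str, int, int]]:
--     """
--     Stateless re-implementation: parse every token first, find group starts by
--     comparing adjacent parsed tokens, then pair each start with its end.
--     """
--     parsed = []
--     for prefixed_tag in seq:
--         if '-' in prefixed_tag:
--             prefix, tag = prefixed_tag.split('-', 1)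
--         else:
--             prefix, tag = '', prefixed_tag
--         parsed.append((prefix, tag))
--     if not parsed:
--         return
--     starts = [(0, parsed[0][1])]
--     for i, (prev, cur) in enumerate(zip(parsed, parsed[1:]), 1):
--         if cur[0] == 'B' or cur[1] != prev[1]:
--             starts.append((i, cur[1]))
--     ends = [i - 1 for i, _ in starts[1:]] + [len(seq) - 1]
--     for (start, tag), end in zip(starts, ends):
--         yield tag, start, end
-- ===== Notes on version B (the rewrite author's own statement) =====
-- stated objective: alternative
-- what changed: A's single stateful pass with running prev_tag/prev_start that emits spans as it goes is replaced by a stateless three-phase pipeline: parse every token into (prefix, tag) first, detect group starts by comparing each parsed token with its predecessor via zip of adjacent pairs, then zip each start with the next start's index minus one (or len-1) to yield the spans.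
import Mathlib
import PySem

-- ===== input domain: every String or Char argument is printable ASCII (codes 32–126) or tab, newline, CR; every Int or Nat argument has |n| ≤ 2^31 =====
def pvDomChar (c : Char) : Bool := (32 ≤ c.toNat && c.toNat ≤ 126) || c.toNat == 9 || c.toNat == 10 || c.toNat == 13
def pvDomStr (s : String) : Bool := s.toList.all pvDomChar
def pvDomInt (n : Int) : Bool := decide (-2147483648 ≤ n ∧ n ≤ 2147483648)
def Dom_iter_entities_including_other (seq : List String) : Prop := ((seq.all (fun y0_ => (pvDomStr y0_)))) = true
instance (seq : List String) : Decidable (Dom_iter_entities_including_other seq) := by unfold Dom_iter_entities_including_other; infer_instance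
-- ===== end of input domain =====

-- B replaces A's single stateful prev_tag/prev_start pass by a stateless decomposition:
-- parse all tokens, detect group starts from adjacent pairs, then zip starts with ends.
-- Objective: alternative decomposition (same O(n) cost). Both ports return the generator's list.

-- ===== PORT A =====
-- shared parsing of one prefixed tag: both Pythons contain this identical split step
def parseTag (s : String) : String × String :=
  if PySem.Str.isIn "-" s then
    match PySem.Str.splitMax? s "-" 1 with
    | some (p :: t :: _) => (p, t)
    | _ => ("", s)   -- unreachable totality guard: '-' ∈ s gives two pieces
  else ("", s)

def iter_entities_including_other (seq : List String) : List (String × Int × Int) :=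
  let r := (PySem.List.enumerate seq 0).foldl
    (fun (st : String × Int × List (String × Int × Int)) ip =>
      let pt := parseTag ip.2
      if pt.1 == "B" || pt.2 != st.1 then
        if st.2.1 < ip.1 then
          (pt.2, ip.1, st.2.2 ++ [(st.1, st.2.1, ip.1 - 1)])
        else
          (pt.2, ip.1, st.2.2)
      else st)
    ("O", 0, [])
  if r.2.1 < (seq.length : Int) then r.2.2 ++ [(r.1, r.2.1, (seq.length : Int) - 1)] else r.2.2

-- ===== PORT B =====
def iter_entities_including_other_alt (seq : List String) : List (String × Int × Int) :=
  let parsed := seq.map parseTag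
  match parsed with
  | [] => []
  | p0 :: rest =>
    let starts : List (Int × String) :=
      (0, p0.2) :: (PySem.List.enumerate ((p0 :: rest).zip rest) 1).foldl
        (fun acc x =>
          if x.2.2.1 == "B" || x.2.2.2 != x.2.1.2 then acc ++ [(x.1, x.2.2.2)] else acc) []
    let ends : List Int := (starts.tail.map (fun x => x.1 - 1)) ++ [(seq.length : Int) - 1]
    (starts.zip ends).map (fun x => (x.1.2, x.1.1, x.2))

-- ===== PRECONDITION & SPEC =====
def Spec_iter_entities_including_other (seq : List String) (out : List (String × Int × Int)) : Prop := out = iter_entities_including_other_alt seq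
instance (seq : List String) (out : List (String × Int × Int)) : Decidable (Spec_iter_entities_including_other seq out) := by unfold Spec_iter_entities_including_other; infer_instance

-- ===== CLAIM (what is proved, stated in full; the proofs are below) =====
def Claim_equal_iter_entities_including_other : Prop := ∀ (seq : List String), Dom_iter_entities_including_other seq → Spec_iter_entities_including_other seq (iter_entities_including_other seq)

-- ===== LEMMAS AND PROOFS =====

-- proof-side recursive form of A's loop: processes remaining tokens at index j with open group (t, s)
def runA : List String → Int → String → Int → String × Int × List (String × Int × Int)
  | [], _, t, s => (t, s, [])
  | q :: rest, j, t, s =>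
    let pt := parseTag q
    if pt.1 == "B" || pt.2 != t then
      if s < j then
        let r := runA rest (j+1) pt.2 j
        (r.1, r.2.1, (t, s, j - 1) :: r.2.2)
      else runA rest (j+1) pt.2 j
    else runA rest (j+1) t s

-- proof-side recursive form of B's boundary scan: entries for parsed tokens at index j given previous tag t
def bl : List (String × String) → String → Int → List (Int × String)
  | [], _, _ => []
  | p :: rest, t, j =>
    if p.1 == "B" || p.2 != t then (j, p.2) :: bl rest p.2 (j+1)
    else bl rest p.2 (j+1)

-- proof-side recursive form of B's start/end walk
def mk : List (Int × String) → Int → List (String × Int × Int)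
  | [], _ => []
  | (s, t) :: S, N =>
    (t, s, match S with | [] => N - 1 | (s', _) :: _ => s' - 1) :: mk S N

theorem foldlA_eq_runA (seq : List String) : ∀ (i : Int) (t : String) (s : Int)
    (acc : List (String × Int × Int)),
    (PySem.List.enumerate seq i).foldl
      (fun (st : String × Int × List (String × Int × Int)) ip =>
        let pt := parseTag ip.2
        if pt.1 == "B" || pt.2 != st.1 then
          if st.2.1 < ip.1 then
            (pt.2, ip.1, st.2.2 ++ [(st.1, st.2.1, ip.1 - 1)])
          else
            (pt.2, ip.1, st.2.2)
        else st) (t, s, acc)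
    = ((runA seq i t s).1, (runA seq i t s).2.1, acc ++ (runA seq i t s).2.2) := by
  induction seq with
  | nil => intro i t s acc; simp [runA, PySem.List.enumerate_nil]
  | cons q rest ih =>
    intro i t s acc
    rw [PySem.List.enumerate_cons]
    simp only [List.foldl_cons, runA]
    by_cases h1 : ((parseTag q).1 == "B" || (parseTag q).2 != t) = true
    · by_cases h2 : s < i
      · simp only [h1, if_true, if_pos h2, ih]; simp
      · simp only [h1, if_true, if_neg h2, ih]
    · simp only [h1, if_false, Bool.false_eq_true, ih]

theorem foldlB_eq_bl (l : List (String × String)) : ∀ (p : String × String) (j : Int)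
    (acc : List (Int × String)),
    (PySem.List.enumerate ((p :: l).zip l) j).foldl
      (fun acc x =>
        if x.2.2.1 == "B" || x.2.2.2 != x.2.1.2 then acc ++ [(x.1, x.2.2.2)] else acc) acc
    = acc ++ bl l p.2 j := by
  induction l with
  | nil => intro p j acc; simp [bl, PySem.List.enumerate_nil]
  | cons q rest ih =>
    intro p j acc
    simp only [List.zip_cons_cons]
    rw [PySem.List.enumerate_cons]
    simp only [List.foldl_cons, bl]
    by_cases h : (q.1 == "B" || q.2 != p.2) = true
    · simp only [h, if_true, ih]; simp
    · simp only [h, Bool.false_eq_true, if_false, ih]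

theorem zipwalk_eq_mk (S : List (Int × String)) : ∀ (N : Int),
    ((S.zip ((S.tail.map (fun x => x.1 - 1)) ++ [N - 1])).map
      (fun x => (x.1.2, x.1.1, x.2))) = mk S N := by
  induction S with
  | nil => intro N; simp [mk]
  | cons a S ih =>
    intro N
    obtain ⟨s, t⟩ := a
    cases S with
    | nil => simp [mk]
    | cons b S' =>
      obtain ⟨s', t'⟩ := b
      have h := ih N
      simp only [List.tail_cons] at h ⊢
      simp only [List.map_cons]
      rw [show mk ((s, t) :: (s', t') :: S') N = (t, s, s' - 1) :: mk ((s', t') :: S') N from rfl]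
      rw [← h]
      simp

theorem main_lemma (rest : List String) : ∀ (j t s), s < j →
    (if (runA rest j t s).2.1 < j + (rest.length : Int) then
        (runA rest j t s).2.2 ++ [((runA rest j t s).1, (runA rest j t s).2.1, j + (rest.length : Int) - 1)]
      else (runA rest j t s).2.2)
    = mk ((s, t) :: bl (rest.map parseTag) t j) (j + (rest.length : Int)) := by
  induction rest with
  | nil =>
    intro j t s hs
    simp only [runA, List.length_nil, List.map_nil, bl, mk]
    simp [hs]
  | cons q rest ih =>
    intro j t s hs
    simp only [runA, List.map_cons, bl]
    by_cases h1 : ((parseTag q).1 == "B" || (parseTag q).2 != t) = true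
    · simp only [h1, if_pos, if_pos hs]
      have hj : (j : Int) < j + 1 := by omega
      have := ih (j+1) (parseTag q).2 j hj
      simp only [List.length_cons]
      have harith : j + 1 + (rest.length : Int) = j + (((rest.length + 1 : Nat)) : Int) := by
        push_cast; omega
      rw [harith] at this
      -- LHS: conditional distributes over the cons
      rw [show ∀ (c : Prop) [Decidable c] (x : String × Int × Int) (xs ys : List (String × Int × Int)),
            (if c then (x :: xs) ++ ys else x :: xs) = x :: (if c then xs ++ ys else xs) from
            by intro c _ x xs ys; split <;> simp]
      rw [this]
      simp [mk]
    · simp only [h1, Bool.false_eq_true, if_false]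
      simp only [Bool.or_eq_true] at h1
      push Not at h1
      have ht : (parseTag q).2 = t := by
        have := h1.2; simpa using this
      have := ih (j+1) t s (by omega)
      simp only [List.length_cons]
      have harith : j + 1 + (rest.length : Int) = j + (((rest.length + 1 : Nat)) : Int) := by
        push_cast; omega
      rw [harith] at this
      rw [ht, this]

theorem runA_first (q : String) (rest : List String) (j : Int) (t : String) :
    runA (q :: rest) j t j = runA rest (j+1) (parseTag q).2 j := by
  simp only [runA]
  by_cases h1 : ((parseTag q).1 == "B" || (parseTag q).2 != t) = true
  · simp [h1]
  · simp only [h1, Bool.false_eq_true, if_false]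
    simp only [Bool.or_eq_true] at h1
    push Not at h1
    have ht : (parseTag q).2 = t := by simpa using h1.2
    rw [ht]

-- ===== VERDICT (by name: the statement is the Claim_ definition above) =====
theorem iter_entities_including_other_spec : Claim_equal_iter_entities_including_other := by
  intro seq _
  unfold Spec_iter_entities_including_other
  unfold iter_entities_including_other iter_entities_including_other_alt
  cases seq with
  | nil => simp [PySem.List.enumerate_nil]
  | cons q rest =>
    simp only [List.map_cons]
    rw [foldlA_eq_runA (q :: rest) 0 "O" 0 []]
    simp only [List.nil_append]
    rw [runA_first q rest 0 "O"]
    rw [foldlB_eq_bl (rest.map parseTag) (parseTag q) 1 []]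
    simp only [List.nil_append, List.tail_cons]
    have hz := zipwalk_eq_mk ((0, (parseTag q).2) :: bl (rest.map parseTag) (parseTag q).2 1)
      ((q :: rest).length : Int)
    simp only [List.tail_cons] at hz
    rw [hz]
    have hlen : ((q :: rest).length : Int) = 1 + (rest.length : Int) := by
      simp [List.length_cons]; omega
    rw [hlen, show (0 : Int) + 1 = 1 from rfl]
    have := main_lemma rest 1 (parseTag q).2 0 (by omega)
    rw [show (1 : Int) + (rest.length : Int) = 1 + (rest.length : Int) from rfl] at this
    rw [this]
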